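-- pv_equiv track=rewrite | github.com/mumarasif/advent-of-code-2025 | Day 3 - Lobby/Part 2.py | max_k_from_digits
-- ===== SOURCE A (Python) =====
-- def max_k_from_digits(s: str, k: int) -> str:
--     n = len(s)
--     if k >= n:
--         return s
--     drop = n - k
--     stack = []
--     for ch in s:
--         while drop and stack and stack[-1] < ch:
--             stack.pop()
--             drop -= 1
--         stack.append(ch)
--     if drop:
--         stack = stack[:-drop]
--     return ''.join(stack[:k])
-- ===== SOURCE B (Python) =====
-- def max_k_from_digits(s: str, k: int) -> str:
--     # Repeated greedy window selection: pick each output char as the earliest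
--     # maximum of the window that leaves enough characters for the rest.
--     n = len(s)
--     if k >= n:
--         return s
--     if k <= 0:
--         return ''
--     res = []
--     t = s
--     remaining = k
--     while remaining > 0:
--         window = t[:len(t) - remaining + 1]
--         best = None  # (index, char), earliest maximum
--         for j, ch in enumerate(window):
--             if best is None or ch > best[1]:
--                 best = (j, ch)
--         bi, bc = best
--         res.append(bc)
--         t = t[bi + 1:]
--         remaining -= 1
--     return ''.join(res)
-- ===== Notes on version B (the rewrite author's own statement) =====
-- stated objective: alternative
-- what changed: Replaces the monotonic-stack pass (push each char, popping smaller stack tops while drops remain, then truncate) with k repeated greedy window scans: each output character is the earliest maximum of the window that leaves enough characters for the remaining picks, recursing on the suffix after it.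
import Mathlib
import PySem

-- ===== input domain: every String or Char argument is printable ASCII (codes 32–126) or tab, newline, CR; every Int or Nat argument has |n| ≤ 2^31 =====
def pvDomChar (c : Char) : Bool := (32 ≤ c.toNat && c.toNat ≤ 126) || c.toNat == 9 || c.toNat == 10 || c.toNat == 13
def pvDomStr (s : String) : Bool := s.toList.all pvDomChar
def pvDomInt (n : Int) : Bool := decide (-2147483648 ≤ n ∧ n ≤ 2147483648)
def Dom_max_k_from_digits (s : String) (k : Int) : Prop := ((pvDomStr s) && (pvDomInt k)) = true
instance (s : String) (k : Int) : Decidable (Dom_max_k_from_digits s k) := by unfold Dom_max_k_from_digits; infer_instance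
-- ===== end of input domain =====

-- B replaces A's monotonic-stack pass by repeated greedy window scans (pick the earliest
-- maximum that leaves enough characters, then recurse on the suffix); objective: alternative
-- algorithm of similar cost, proved to return the same string.

-- ===== PORT A =====
-- A's `stack` (Python list, appended/popped at the right end) is kept here with its TOP AT THE
-- HEAD of the list; the final slicing therefore acts on `stack.reverse`, the Python-order list.
-- `aPop` is the `while drop and stack and stack[-1] < ch` loop, `aStep` one iteration of `for ch in s`.
def aPop (drop : Int) (st : List Char) (ch : Char) : Int × List Char :=
  match st with
  | [] => (drop, [])
  | t :: rest =>
    if drop ≠ 0 ∧ t < ch then aPop (drop - 1) rest ch else (drop, t :: rest)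

def aStep (acc : Int × List Char) (ch : Char) : Int × List Char :=
  ((aPop acc.1 acc.2 ch).1, ch :: (aPop acc.1 acc.2 ch).2)

def max_k_from_digits (s : String) (k : Int) : String :=
  let n : Int := PySem.Str.len s
  if k ≥ n then s
  else
    let res := s.toList.foldl aStep (n - k, [])
    let stack := res.2.reverse
    let stack := if res.1 ≠ 0 then PySem.List.slice stack none (some (-res.1)) else stack
    String.ofList (PySem.List.slice stack none (some k))

-- ===== PORT B =====
-- `bUpd` is the body of Source B's `for j, ch in enumerate(window)` scan (earliest maximum);
-- `bPick` is Source B's recursive `pick`.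
def bUpd (best : Option (Int × Char)) (p : Int × Char) : Option (Int × Char) :=
  match best with
  | none => some p
  | some q => if q.2 < p.2 then some p else some q

def bPick (t : List Char) (k : Int) : List Char :=
  if k ≤ 0 then []
  else
    let window := PySem.List.slice t none (some ((t.length : Int) - k + 1))
    match (PySem.List.enumerate window 0).foldl bUpd none with
    | some (bi, bc) => bc :: bPick (PySem.List.slice t (some (bi + 1)) none) (k - 1)
    | none => []
termination_by k.toNat
decreasing_by omega

def max_k_from_digits_alt (s : String) (k : Int) : String :=
  let n : Int := PySem.Str.len s
  if k ≥ n then s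
  else if k ≤ 0 then ""
  else String.ofList (bPick s.toList k)

-- ===== PRECONDITION & SPEC =====
-- (A returns normally on every input: no Pre_ needed.)
def Spec_max_k_from_digits (s : String) (k : Int) (out : String) : Prop := out = max_k_from_digits_alt s k
instance (s : String) (k : Int) (out : String) : Decidable (Spec_max_k_from_digits s k out) := by unfold Spec_max_k_from_digits; infer_instance

-- ===== CLAIM (what is proved, stated in full; the proofs are below) =====
def Claim_equal_max_k_from_digits : Prop := ∀ (s : String) (k : Int), Dom_max_k_from_digits s k → Spec_max_k_from_digits s k (max_k_from_digits s k)

-- ===== LEMMAS AND PROOFS =====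

theorem pop_pot (st : List Char) (d : Int) (ch : Char) :
    (aPop d st ch).1 - ((aPop d st ch).2.length : Int) = d - st.length := by
  induction st generalizing d with
  | nil => simp [aPop]
  | cons t rest ih =>
    simp only [aPop]
    split
    next h =>
      have := ih (d - 1); simp only [List.length_cons]; push_cast; omega
    next h => push_cast [List.length_cons]; ring

theorem pop_nonneg (st : List Char) (d : Int) (ch : Char) (hd : 0 ≤ d) :
    0 ≤ (aPop d st ch).1 := by
  induction st generalizing d with
  | nil => simpa [aPop]
  | cons t rest ih =>
    simp only [aPop]
    split
    next h => exact ih (d - 1) (by omega)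
    next h => simpa

theorem pop_mem (st : List Char) (d : Int) (ch x : Char) (hx : x ∈ (aPop d st ch).2) : x ∈ st := by
  induction st generalizing d with
  | nil => simp [aPop] at hx
  | cons t rest ih =>
    simp only [aPop] at hx
    revert hx; split
    next h => exact fun hx => List.mem_cons_of_mem _ (ih (d - 1) hx)
    next h => exact fun hx => hx

theorem pop_all (st : List Char) (d : Int) (ch : Char)
    (hlt : ∀ x ∈ st, x < ch) (hd : (st.length : Int) ≤ d) :
    aPop d st ch = (d - st.length, []) := by
  induction st generalizing d with
  | nil => simp [aPop]
  | cons t rest ih =>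
    simp only [aPop]
    rw [if_pos ⟨by simp at hd; omega, hlt t (List.mem_cons_self)⟩]
    rw [ih (d - 1) (fun x hx => hlt x (List.mem_cons_of_mem _ hx)) (by simp at hd; omega)]
    simp only [List.length_cons]; push_cast; ring_nf

theorem pop_concat (S : List Char) (d : Int) (c ch : Char) (hd : 0 ≤ d)
    (hno : ¬ (c < ch ∧ (S.length : Int) < d)) :
    aPop d (S ++ [c]) ch = ((aPop d S ch).1, (aPop d S ch).2 ++ [c]) := by
  induction S generalizing d with
  | nil =>
    simp only [List.nil_append, aPop]
    split
    next h =>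
      exact absurd ⟨h.2, by simp; omega⟩ hno
    next h => simp
  | cons t rest ih =>
    simp only [List.cons_append, aPop]
    split
    next h =>
      rw [ih (d - 1) (by omega) (by simp at hno ⊢; intro hc; have := hno hc; omega)]
    next h => simp

theorem run_pot (l : List Char) (d : Int) (st : List Char) :
    (l.foldl aStep (d, st)).1 - ((l.foldl aStep (d, st)).2.length : Int) = d - st.length - l.length := by
  induction l generalizing d st with
  | nil => simp
  | cons ch l ih =>
    simp only [List.foldl_cons]
    rw [show aStep (d, st) ch = ((aPop d st ch).1, ch :: (aPop d st ch).2) from rfl]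
    have h1 := pop_pot st d ch
    have h2 := ih (aPop d st ch).1 (ch :: (aPop d st ch).2)
    simp only [List.length_cons] at h2 ⊢
    push_cast at h1 h2 ⊢
    omega

theorem run_nonneg (l : List Char) (d : Int) (st : List Char) (hd : 0 ≤ d) :
    0 ≤ (l.foldl aStep (d, st)).1 := by
  induction l generalizing d st with
  | nil => simpa
  | cons ch l ih =>
    simp only [List.foldl_cons]
    exact ih _ _ (pop_nonneg st d ch hd)

theorem run_mem (l : List Char) (d : Int) (st : List Char) (x : Char)
    (hx : x ∈ (l.foldl aStep (d, st)).2) : x ∈ st ∨ x ∈ l := by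
  induction l generalizing d st with
  | nil => exact Or.inl hx
  | cons ch l ih =>
    simp only [List.foldl_cons] at hx
    rcases ih _ _ hx with h | h
    · rcases List.mem_cons.mp h with h | h
      · exact Or.inr (by simp [h])
      · exact Or.inl (pop_mem st d ch x h)
    · exact Or.inr (List.mem_cons_of_mem _ h)

theorem run_ne_nil (l : List Char) (d : Int) (st : List Char) (hl : l ≠ []) :
    (l.foldl aStep (d, st)).2 ≠ [] := by
  induction l generalizing d st with
  | nil => exact absurd rfl hl
  | cons ch l ih =>
    simp only [List.foldl_cons]
    rcases eq_or_ne l [] with h | h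
    · subst h; simp [aStep]
    · exact ih _ _ h

theorem run_prefix (w : List Char) (d : Int) (c : Char)
    (hlt : ∀ x ∈ w, x < c) (hd : (w.length : Int) ≤ d) :
    (w ++ [c]).foldl aStep (d, []) = (d - w.length, [c]) := by
  have hpot := run_pot w d []
  have hnn := run_nonneg w d [] (le_trans (Int.natCast_nonneg _) hd)
  obtain ⟨d₁, st₁, hrun⟩ : ∃ d₁ st₁, w.foldl aStep (d, []) = (d₁, st₁) :=
    ⟨_, _, rfl⟩
  rw [List.foldl_append, hrun]
  rw [hrun] at hpot hnn
  simp only at hpot hnn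
  have hmem : ∀ x ∈ st₁, x < c := by
    intro x hx
    have := run_mem w d [] x (by rw [hrun]; exact hx)
    simp only [List.not_mem_nil, false_or] at this
    exact hlt x this
  have hlen : (st₁.length : Int) ≤ d₁ := by simp at hpot; omega
  simp only [List.foldl_cons, List.foldl_nil]
  rw [show aStep (d₁, st₁) c = ((aPop d₁ st₁ c).1, c :: (aPop d₁ st₁ c).2) from rfl]
  rw [pop_all st₁ d₁ c hmem hlen]
  simp only [Prod.mk.injEq]
  refine ⟨by simp at hpot ⊢; omega, trivial⟩

theorem run_bottom (rest : List Char) (d : Int) (S : List Char) (c : Char) (hd : 0 ≤ d)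
    (hle : ∀ x ∈ rest.take (d - S.length).toNat, x ≤ c) :
    rest.foldl aStep (d, S ++ [c]) = ((rest.foldl aStep (d, S)).1, (rest.foldl aStep (d, S)).2 ++ [c]) := by
  induction rest generalizing d S with
  | nil => simp
  | cons ch rest ih =>
    simp only [List.foldl_cons]
    have hno : ¬ (c < ch ∧ (S.length : Int) < d) := by
      rintro ⟨hc, hlen⟩
      have h1 : 1 ≤ (d - S.length).toNat := by omega
      have hch : ch ∈ (ch :: rest).take (d - S.length).toNat := by
        rcases Nat.exists_eq_add_of_le h1 with ⟨j, hj⟩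
        rw [hj, Nat.add_comm, List.take_succ_cons]
        exact List.mem_cons_self
      exact absurd (hle ch hch) (not_le.mpr hc)
    rw [show aStep (d, S ++ [c]) ch = ((aPop d (S ++ [c]) ch).1, ch :: (aPop d (S ++ [c]) ch).2) from rfl]
    rw [pop_concat S d c ch hd hno]
    rw [show aStep (d, S) ch = ((aPop d S ch).1, ch :: (aPop d S ch).2) from rfl]
    have hpp := pop_pot S d ch
    have hkey : (aPop d S ch).1 - ((ch :: (aPop d S ch).2).length : Int) = d - S.length - 1 := by
      simp only [List.length_cons]; push_cast; omega
    have := ih (aPop d S ch).1 (ch :: (aPop d S ch).2) (pop_nonneg S d ch hd) ?_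
    · rw [show (ch :: (aPop d S ch).2) ++ [c] = ch :: ((aPop d S ch).2 ++ [c]) from rfl] at this
      exact this
    · intro x hx
      apply hle
      have hsub : ((aPop d S ch).1 - ((ch :: (aPop d S ch).2).length : Int)).toNat
          = (d - S.length).toNat - 1 := by omega
      rw [hsub] at hx
      rcases Nat.eq_zero_or_pos (d - (S.length : Int)).toNat with h0 | hpos
      · rw [h0] at hx; simp at hx
      · rcases Nat.exists_eq_add_of_le hpos with ⟨j, hj⟩
        rw [hj]
        simp only [Nat.add_comm 1 j] at hj ⊢
        rw [List.take_succ_cons]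
        right
        simpa [hj] using hx

def argmaxFrom (p : Int × Char) (w : List Char) (s : Int) : Int × Char :=
  match w with
  | [] => p
  | x :: xs => if p.2 < x then argmaxFrom (s, x) xs (s + 1) else argmaxFrom p xs (s + 1)

theorem fold_bUpd_some (w : List Char) (s : Int) (p : Int × Char) :
    (PySem.List.enumerate w s).foldl bUpd (some p) = some (argmaxFrom p w s) := by
  induction w generalizing s p with
  | nil => simp [PySem.List.enumerate_nil, argmaxFrom]
  | cons x xs ih =>
    rw [PySem.List.enumerate_cons]
    simp only [List.foldl_cons, argmaxFrom, bUpd]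
    split
    next h => exact ih (s + 1) (s, x)
    next h => exact ih (s + 1) p

theorem argmax_ub (w : List Char) (s : Int) (p : Int × Char) :
    (∀ x ∈ w, x ≤ (argmaxFrom p w s).2) ∧ p.2 ≤ (argmaxFrom p w s).2 := by
  induction w generalizing s p with
  | nil => simp [argmaxFrom]
  | cons x xs ih =>
    simp only [argmaxFrom]
    split
    next h =>
      obtain ⟨h1, h2⟩ := ih (s + 1) (s, x)
      refine ⟨?_, le_trans (le_of_lt h) h2⟩
      intro y hy
      rcases List.mem_cons.mp hy with rfl | hy
      · exact h2
      · exact h1 y hy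
    next h =>
      obtain ⟨h1, h2⟩ := ih (s + 1) p
      refine ⟨?_, h2⟩
      intro y hy
      rcases List.mem_cons.mp hy with rfl | hy
      · exact le_trans (not_lt.mp h) h2
      · exact h1 y hy

theorem argmax_loc (w : List Char) (s : Int) (p : Int × Char) :
    argmaxFrom p w s = p ∨
    ∃ (m : Nat), ∃ (hm : m < w.length),
      argmaxFrom p w s = (s + m, w[m]) ∧ p.2 < w[m] ∧
      ∀ (i : Nat) (hi : i < m), w[i]'(hi.trans hm) < w[m] := by
  induction w generalizing s p with
  | nil => exact Or.inl rfl
  | cons x xs ih =>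
    simp only [argmaxFrom]
    split
    next h =>
      right
      rcases ih (s + 1) (s, x) with heq | ⟨m, hm, heq, hlt, hstrict⟩
      · exact ⟨0, by simp, by simpa using heq, by simpa using h, by omega⟩
      · have hx : x < xs[m] := hlt
        refine ⟨m + 1, by simpa using hm, ?_, ?_, ?_⟩
        · rw [heq]
          simp only [List.getElem_cons_succ, Prod.mk.injEq]
          exact ⟨by push_cast; ring, trivial⟩
        · simpa using lt_trans h hx
        · intro i hi
          match i with
          | 0 => simpa using hx
          | j + 1 => simpa using hstrict j (by omega)
    next h =>
      rcases ih (s + 1) p with heq | ⟨m, hm, heq, hlt, hstrict⟩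
      · exact Or.inl heq
      · right
        have hx : x < xs[m] := lt_of_le_of_lt (not_lt.mp h) hlt
        refine ⟨m + 1, by simpa using hm, ?_, by simpa using hlt, ?_⟩
        · rw [heq]
          simp only [List.getElem_cons_succ, Prod.mk.injEq]
          exact ⟨by push_cast; ring, trivial⟩
        · intro i hi
          match i with
          | 0 => simpa using hx
          | j + 1 => simpa using hstrict j (by omega)

theorem fold_argmax_spec (w : List Char) (hw : w ≠ []) :
    ∃ (m : Nat), ∃ (hm : m < w.length),
      (PySem.List.enumerate w 0).foldl bUpd none = some ((m : Int), w[m]) ∧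
      (∀ (i : Nat) (hi : i < m), w[i]'(hi.trans hm) < w[m]) ∧
      (∀ (i : Nat) (hi : i < w.length), w[i] ≤ w[m]) := by
  obtain ⟨x, xs, rfl⟩ := List.exists_cons_of_ne_nil hw
  rw [PySem.List.enumerate_cons]
  simp only [List.foldl_cons]
  rw [show bUpd none (0, x) = some (0, x) from rfl]
  rw [show (0:Int) + 1 = 1 from rfl, fold_bUpd_some xs 1 (0, x)]
  obtain ⟨hub, _⟩ := argmax_ub xs 1 (0, x)
  rcases argmax_loc xs 1 (0, x) with heq | ⟨m, hm, heq, hlt, hstrict⟩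
  · rw [heq] at hub
    refine ⟨0, by simp, by simp [heq], ?_, ?_⟩
    · intro i hi; exact absurd hi (Nat.not_lt_zero i)
    · intro i hi
      match i with
      | 0 => simp
      | j + 1 =>
        have hj : j < xs.length := by simpa using hi
        simpa using hub (xs[j]'hj) (List.getElem_mem hj)
  · rw [heq] at hub
    refine ⟨m + 1, by simpa using hm, ?_, ?_, ?_⟩
    · have hcast : ((m + 1 : Nat) : Int) = 1 + m := by push_cast; ring
      rw [heq, hcast]
      simp
    · intro i hi
      match i with
      | 0 => simpa using hlt
      | j + 1 => simpa using hstrict j (by omega)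
    · intro i hi
      match i with
      | 0 => simpa using le_of_lt hlt
      | j + 1 =>
        have hj : j < xs.length := by simpa using hi
        simpa using hub (xs[j]'hj) (List.getElem_mem hj)

theorem main_lemma (k : Nat) : ∀ (l : List Char), k ≤ l.length →
    ((l.foldl aStep (((l.length : Int) - k), [])).2.reverse).take k = bPick l (k : Int) := by
  induction k with
  | zero => intro l h; simp [bPick]
  | succ k ih =>
    intro l hkl
    have hl : l ≠ [] := by intro h; subst h; simp at hkl
    have hb : (0:Int) ≤ (l.length : Int) - ((k + 1 : Nat) : Int) + 1 := by push_cast; omega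
    have hwin : PySem.List.slice l none (some ((l.length : Int) - ((k + 1 : Nat) : Int) + 1))
        = l.take (l.length - k) := by
      rw [PySem.List.slice_to l hb]
      congr 1
      push_cast
      omega
    set W := l.take (l.length - k) with hW
    have hWlen : W.length = l.length - k := by
      rw [hW, List.length_take]; omega
    have hWne : W ≠ [] := by
      intro h
      have := congrArg List.length h
      rw [hWlen] at this; simp at this; omega
    obtain ⟨m, hm, hfold, hstrict, hub⟩ := fold_argmax_spec W hWne
    have hmn : m < l.length - k := by omega
    have hml : m < l.length := by omega
    have hWm : W[m] = l[m]'hml := by simp [hW]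
    -- B side reduction
    have hBstep : bPick l ((k + 1 : Nat) : Int) = W[m] :: bPick (l.drop (m + 1)) (k : Int) := by
      rw [bPick]
      rw [if_neg (by push_cast; omega)]
      simp only [hwin, hfold]
      rw [PySem.List.slice_from l (by positivity : (0:Int) ≤ (m : Int) + 1)]
      have h1 : ((m : Int) + 1).toNat = m + 1 := by omega
      have h2 : ((k + 1 : Nat) : Int) - 1 = (k : Int) := by push_cast; ring
      rw [h1, h2]
    -- A side decomposition
    have hsplit : l = (l.take m ++ [W[m]]) ++ l.drop (m + 1) := by
      rw [hWm, List.append_assoc, List.singleton_append, ← List.drop_eq_getElem_cons hml,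
        List.take_append_drop]
    set c := W[m] with hc
    set rest := l.drop (m + 1) with hrest
    have hrestlen : rest.length = l.length - (m + 1) := by rw [hrest, List.length_drop]
    set D : Int := (l.length : Int) - ((k + 1 : Nat) : Int) with hD
    have hA : (l.foldl aStep (D, [])).2
        = (rest.foldl aStep (((rest.length : Int) - (k : Int)), [])).2 ++ [c] := by
      have e1 : l.foldl aStep (D, []) = ((l.take m ++ [c]) ++ rest).foldl aStep (D, []) := by
        rw [← hsplit]
      rw [e1, List.foldl_append]
      rw [run_prefix (l.take m) D c ?hlt ?hd]
      case hlt =>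
        intro x hx
        obtain ⟨i, hi, hxe⟩ := List.getElem_of_mem hx
        have him : i < m := by simp [List.length_take] at hi; omega
        have hxW : x = W[i]'(by omega) := by
          rw [← hxe]; simp [hW]
        rw [hxW, hc]
        exact hstrict i him
      case hd =>
        rw [List.length_take]; omega
      have harg : D - ((l.take m).length : Int) = ((rest.length : Int) - (k : Int)) := by
        rw [List.length_take, hrestlen, hD]; push_cast; omega
      rw [harg]
      have hbot := run_bottom rest ((rest.length : Int) - (k : Int)) [] c
        (by rw [hrestlen]; omega) ?hle
      case hle =>
        intro x hx
        obtain ⟨j, hj, hxe⟩ := List.getElem_of_mem hx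
        have hjlen : j < ((rest.length : Int) - (k : Int)).toNat := by
          simp [List.length_take] at hj; omega
        have hjb : m + 1 + j < l.length - k := by
          rw [hrestlen] at hjlen; omega
        have hxW : x = W[m + 1 + j]'(by omega) := by
          rw [← hxe]; simp [hW, hrest, List.getElem_take, List.getElem_drop]
        rw [hxW, hc]
        exact hub (m + 1 + j) (by omega)
      simp only [List.nil_append] at hbot
      rw [hbot]
    -- assemble
    rw [hA, hBstep]
    rw [List.reverse_append]
    simp only [List.reverse_singleton, List.singleton_append, List.take_succ_cons]
    congr 1
    exact ih rest (by rw [hrestlen]; omega)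

theorem final_eq (s : String) (k : Int) : max_k_from_digits s k = max_k_from_digits_alt s k := by
  unfold max_k_from_digits max_k_from_digits_alt
  rw [PySem.Str.len_eq]
  set l := s.toList with hl
  set n := l.length with hn
  by_cases hk : k ≥ (n : Int)
  · simp only [if_pos hk]
  · simp only [if_neg hk]
    set res := l.foldl aStep ((n : Int) - k, []) with hres
    have hpot := run_pot l ((n : Int) - k) []
    rw [← hres] at hpot
    have hdrop : res.1 = (res.2.length : Int) - k := by simp at hpot; omega
    have hnn : 0 ≤ res.1 := by
      rw [hres]; exact run_nonneg l _ [] (by omega)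
    by_cases hk0 : k ≤ 0
    · simp only [if_pos hk0]
      rcases eq_or_ne l [] with hle | hlne
      · have hres0 : res = ((n : Int) - k, []) := by rw [hres, hle]; rfl
        rw [hres0]
        have hn0 : (n : Int) = 0 := by rw [hn, hle]; rfl
        have : (n : Int) - k ≠ 0 := by omega
        rw [if_pos this]
        simp [PySem.List.slice]
      · have hne : res.2 ≠ [] := by rw [hres]; exact run_ne_nil l _ [] hlne
        have hlen1 : 1 ≤ res.2.length := List.length_pos_iff.mpr hne
        have hd : res.1 ≠ 0 := by omega
        rw [if_pos hd]
        have h1 : -res.1 = -((res.1.toNat : Nat) : Int) := by omega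
        rw [h1, PySem.List.slice_to_neg_natCast _ res.1.toNat (by omega)]
        have h2 : res.2.reverse.length - res.1.toNat = 0 := by
          simp only [List.length_reverse]; omega
        rw [h2, List.take_zero]
        simp [PySem.List.slice]
    · simp only [if_neg hk0]
      have hk1 : 0 < k := by omega
      have hmain := main_lemma k.toNat l (by omega)
      have hcast : ((k.toNat : Nat) : Int) = k := by omega
      rw [hcast] at hmain
      rw [← hn, ← hres] at hmain
      rw [← hmain]
      by_cases hd : res.1 = 0
      · rw [if_neg (by simpa using hd)]
        rw [PySem.List.slice_to _ (le_of_lt hk1)]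
      · rw [if_pos hd]
        have h1 : -res.1 = -((res.1.toNat : Nat) : Int) := by omega
        rw [h1, PySem.List.slice_to_neg_natCast _ res.1.toNat (by omega)]
        rw [PySem.List.slice_to _ (le_of_lt hk1)]
        have h2 : res.2.reverse.length - res.1.toNat = k.toNat := by
          simp only [List.length_reverse]; omega
        rw [h2, List.take_take]
        simp

-- ===== VERDICT (by name: the statement is the Claim_ definition above) =====
theorem max_k_from_digits_spec : Claim_equal_max_k_from_digits := by
  intro s k _
  unfold Spec_max_k_from_digits
  exact final_eq s k
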